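-- pv_equiv track=rewrite | github.com/scottvr/phart | src/phart/rendering/ports.py | values_with_min_separation
-- ===== SOURCE A (Python) =====
-- from typing import TYPE_CHECKING, Any, Dict, List, Optional, Tuple
--
-- def values_with_min_separation(
--     candidates: List[int], used_values: List[int], min_sep: int
-- ) -> List[int]:
--     """Filter candidate values by minimum separation from existing values."""
--     if not used_values:
--         return list(candidates)
--
--     filtered = [
--         candidate
--         for candidate in candidates
--         if all(abs(candidate - used) >= min_sep for used in used_values)
--     ]
--     return filtered if filtered else list(candidates)
-- ===== SOURCE B (Python) =====
-- def values_with_min_separation(candidates, used_values, min_sep):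
--     """Filter candidate values by minimum separation from existing values.
--
--     Sorts used_values once and binary-searches each candidate's insertion
--     point: only the two nearest used values need to be checked.
--     """
--     if not used_values:
--         return list(candidates)
--     s = sorted(used_values)
--     n = len(s)
--     result = []
--     for c in candidates:
--         lo, hi = 0, n
--         while lo < hi:
--             mid = (lo + hi) // 2
--             if s[mid] < c:
--                 lo = mid + 1
--             else:
--                 hi = mid
--         if (lo == n or s[lo] - c >= min_sep) and (lo == 0 or c - s[lo - 1] >= min_sep):
--             result.append(c)
--     return result if result else list(candidates)
-- ===== Notes on version B (the rewrite author's own statement) =====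
-- stated objective: faster
-- what changed: Instead of testing every candidate against every used value, B sorts used_values once and binary-searches each candidate's insertion point, checking only the two neighbouring used values.
import Mathlib
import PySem

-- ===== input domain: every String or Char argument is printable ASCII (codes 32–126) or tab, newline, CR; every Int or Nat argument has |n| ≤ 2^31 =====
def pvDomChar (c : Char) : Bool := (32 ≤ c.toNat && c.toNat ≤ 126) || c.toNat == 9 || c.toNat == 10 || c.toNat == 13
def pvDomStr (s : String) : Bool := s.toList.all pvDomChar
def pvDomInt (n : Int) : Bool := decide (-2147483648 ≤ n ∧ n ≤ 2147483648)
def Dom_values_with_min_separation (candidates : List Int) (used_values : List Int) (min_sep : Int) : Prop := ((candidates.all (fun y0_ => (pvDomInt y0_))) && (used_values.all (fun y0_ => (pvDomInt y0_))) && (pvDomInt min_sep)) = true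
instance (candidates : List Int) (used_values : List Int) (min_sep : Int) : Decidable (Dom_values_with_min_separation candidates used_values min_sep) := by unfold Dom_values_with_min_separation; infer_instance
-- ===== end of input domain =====

-- B replaces A's candidate-by-candidate scan of all used values with one sort of
-- used_values plus a binary search per candidate (objective: faster, asymptotically).

-- ===== PORT A =====
def values_with_min_separation (candidates : List Int) (used_values : List Int) (min_sep : Int) : List Int :=
  if used_values = [] then candidates
  else
    let filtered := candidates.filter (fun candidate =>
      used_values.all (fun used => decide (min_sep ≤ |candidate - used|)))
    if filtered ≠ [] then filtered else candidates

-- ===== PORT B =====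
-- the hand-written bisect-left loop of Source B (lo/hi halving); s is indexed only in range
def pvBisect (s : List Int) (c : Int) (lo hi : Nat) : Nat :=
  if _h : lo < hi then
    let mid := (lo + hi) / 2
    if s.getD mid 0 < c then pvBisect s c (mid + 1) hi else pvBisect s c lo mid
  else lo
termination_by hi - lo
decreasing_by all_goals omega

def values_with_min_separation_alt (candidates : List Int) (used_values : List Int) (min_sep : Int) : List Int :=
  if used_values = [] then candidates
  else
    let s := PySem.List.sorted used_values (fun x => x) false
    let n := s.length
    let result := candidates.foldl (fun acc c =>
      let lo := pvBisect s c 0 n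
      if ((lo == n) || decide (min_sep ≤ s.getD lo 0 - c)) &&
         ((lo == 0) || decide (min_sep ≤ c - s.getD (lo - 1) 0)) then acc ++ [c] else acc) []
    if result ≠ [] then result else candidates

-- ===== PRECONDITION & SPEC =====
def Spec_values_with_min_separation (candidates : List Int) (used_values : List Int) (min_sep : Int) (out : List Int) : Prop := out = values_with_min_separation_alt candidates used_values min_sep
instance (candidates : List Int) (used_values : List Int) (min_sep : Int) (out : List Int) : Decidable (Spec_values_with_min_separation candidates used_values min_sep out) := by unfold Spec_values_with_min_separation; infer_instance

-- ===== CLAIM (what is proved, stated in full; the proofs are below) =====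
def Claim_equal_values_with_min_separation : Prop := ∀ (candidates : List Int) (used_values : List Int) (min_sep : Int), Dom_values_with_min_separation candidates used_values min_sep → Spec_values_with_min_separation candidates used_values min_sep (values_with_min_separation candidates used_values min_sep)

-- ===== LEMMAS AND PROOFS =====

-- invariant of the bisect loop: on a monotone list it returns the split point of c
theorem pvBisect_spec (fuel : Nat) (s : List Int) (c : Int)
    (hmono : ∀ p q : Nat, p ≤ q → q < s.length → s.getD p 0 ≤ s.getD q 0) :
    ∀ lo hi : Nat, hi - lo ≤ fuel → lo ≤ hi → hi ≤ s.length →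
    (∀ j : Nat, j < lo → s.getD j 0 < c) →
    (∀ j : Nat, hi ≤ j → j < s.length → c ≤ s.getD j 0) →
    lo ≤ pvBisect s c lo hi ∧ pvBisect s c lo hi ≤ hi ∧
    (∀ j : Nat, j < pvBisect s c lo hi → s.getD j 0 < c) ∧
    (∀ j : Nat, pvBisect s c lo hi ≤ j → j < s.length → c ≤ s.getD j 0) := by
  induction fuel with
  | zero =>
    intro lo hi hf hle hlen hlo hhi
    have : ¬ lo < hi := by omega
    rw [pvBisect, dif_neg this]
    exact ⟨le_rfl, hle, hlo, fun j hj hjl => hhi j (by omega) hjl⟩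
  | succ fuel ih =>
    intro lo hi hf hle hlen hlo hhi
    by_cases h : lo < hi
    · rw [pvBisect, dif_pos h]
      simp only
      by_cases hc : s.getD ((lo + hi) / 2) 0 < c
      · rw [if_pos hc]
        have hmid1 : (lo + hi) / 2 < hi := by omega
        have := ih ((lo + hi) / 2 + 1) hi (by omega) (by omega) hlen
          (fun j hj => by
            by_cases hjlo : j < lo
            · exact hlo j hjlo
            · exact lt_of_le_of_lt (hmono j ((lo + hi) / 2) (by omega) (by omega)) hc)
          hhi
        exact ⟨by omega, this.2.1, this.2.2.1, this.2.2.2⟩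
      · rw [if_neg hc]
        push Not at hc
        have := ih lo ((lo + hi) / 2) (by omega) (by omega) (by omega) hlo
          (fun j hj hjl => le_trans hc (hmono ((lo + hi) / 2) j hj hjl))
        exact ⟨this.1, by omega, this.2.2.1, this.2.2.2⟩
    · rw [pvBisect, dif_neg h]
      exact ⟨le_rfl, hle, hlo, fun j hj hjl => hhi j (by omega) hjl⟩

-- per-candidate: the two-neighbour test after bisect equals A's all-pairs test
theorem pvCond_eq (used : List Int) (c m : Int) :
    (((pvBisect (PySem.List.sorted used (fun x => x) false) c 0
        (PySem.List.sorted used (fun x => x) false).length ==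
        (PySem.List.sorted used (fun x => x) false).length) ||
      decide (m ≤ (PySem.List.sorted used (fun x => x) false).getD
        (pvBisect (PySem.List.sorted used (fun x => x) false) c 0
          (PySem.List.sorted used (fun x => x) false).length) 0 - c)) &&
     ((pvBisect (PySem.List.sorted used (fun x => x) false) c 0
        (PySem.List.sorted used (fun x => x) false).length == 0) ||
      decide (m ≤ c - (PySem.List.sorted used (fun x => x) false).getD
        (pvBisect (PySem.List.sorted used (fun x => x) false) c 0
          (PySem.List.sorted used (fun x => x) false).length - 1) 0))) =
    used.all (fun u => decide (m ≤ |c - u|)) := by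
  set s := PySem.List.sorted used (fun x => x) false with hs
  set i := pvBisect s c 0 s.length with hi
  have hmono : ∀ p q : Nat, p ≤ q → q < s.length → s.getD p 0 ≤ s.getD q 0 := by
    intro p q hpq hq
    rw [List.getD_eq_getElem _ _ (lt_of_le_of_lt hpq hq), List.getD_eq_getElem _ _ hq]
    exact PySem.List.sorted_id_getElem_mono used hpq hq
  obtain ⟨-, hile, hlt, hge⟩ :=
    pvBisect_spec s.length s c hmono 0 s.length (by omega) (Nat.zero_le _) le_rfl
      (fun j hj => absurd hj (by omega)) (fun j hj hjl => absurd hjl (by omega))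
  rw [show (pvBisect s c 0 s.length) = i from rfl] at hile hlt hge
  rw [Bool.eq_iff_iff]
  simp only [Bool.and_eq_true, Bool.or_eq_true, beq_iff_eq, decide_eq_true_eq, List.all_eq_true]
  constructor
  · rintro ⟨h1, h2⟩ u hu
    rw [← PySem.List.mem_sorted used (fun x => x) false] at hu
    obtain ⟨j, hj, rfl⟩ := List.mem_iff_getElem.mp hu
    rw [← List.getD_eq_getElem s 0 hj]
    by_cases hji : j < i
    · have hipos : 0 < i := by omega
      have h2' : m ≤ c - s.getD (i - 1) 0 := by
        rcases h2 with h2 | h2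
        · omega
        · exact h2
      have hA : s.getD j 0 ≤ s.getD (i - 1) 0 := hmono j (i - 1) (by omega) (by omega)
      have hB : s.getD j 0 < c := hlt j hji
      rw [abs_of_pos (by omega)]; omega
    · have hci : c ≤ s.getD j 0 := hge j (by omega) hj
      have h1' : m ≤ s.getD i 0 - c := by
        rcases h1 with h1 | h1
        · exact absurd hj (Nat.not_lt.mpr (h1 ▸ Nat.not_lt.mp hji))
        · exact h1
      have hA : s.getD i 0 ≤ s.getD j 0 := hmono i j (by omega) hj
      rw [abs_of_nonpos (by omega)]; omega
  · intro h
    have hmem : ∀ j : Nat, j < s.length → m ≤ |c - s.getD j 0| := by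
      intro j hj
      rw [List.getD_eq_getElem s 0 hj]
      exact h s[j] ((PySem.List.mem_sorted used (fun x => x) false _).mp (List.getElem_mem hj))
    constructor
    · by_cases hin : i = s.length
      · exact Or.inl hin
      · refine Or.inr ?_
        have hil : i < s.length := by omega
        have := hmem i hil
        have hci : c ≤ s.getD i 0 := hge i le_rfl hil
        rw [abs_of_nonpos (by omega)] at this; omega
    · by_cases hi0 : i = 0
      · exact Or.inl hi0
      · refine Or.inr ?_
        have hil : i - 1 < s.length := by omega
        have := hmem (i - 1) hil
        have hci : s.getD (i - 1) 0 < c := hlt (i - 1) (by omega)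
        rw [abs_of_pos (by omega)] at this; omega

-- ===== VERDICT (by name: the statement is the Claim_ definition above) =====
theorem values_with_min_separation_spec : Claim_equal_values_with_min_separation := by
  intro candidates used_values min_sep _
  unfold Spec_values_with_min_separation
  unfold values_with_min_separation values_with_min_separation_alt
  by_cases h : used_values = []
  · simp [h]
  · rw [if_neg h, if_neg h]
    simp only
    rw [show (fun (acc : List Int) (c : Int) =>
          if ((pvBisect (PySem.List.sorted used_values (fun x => x) false) c 0
                (PySem.List.sorted used_values (fun x => x) false).length ==
                (PySem.List.sorted used_values (fun x => x) false).length) ||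
              decide (min_sep ≤ (PySem.List.sorted used_values (fun x => x) false).getD
                (pvBisect (PySem.List.sorted used_values (fun x => x) false) c 0
                  (PySem.List.sorted used_values (fun x => x) false).length) 0 - c)) &&
             ((pvBisect (PySem.List.sorted used_values (fun x => x) false) c 0
                (PySem.List.sorted used_values (fun x => x) false).length == 0) ||
              decide (min_sep ≤ c - (PySem.List.sorted used_values (fun x => x) false).getD
                (pvBisect (PySem.List.sorted used_values (fun x => x) false) c 0
                  (PySem.List.sorted used_values (fun x => x) false).length - 1) 0))
          then acc ++ [c] else acc) =
        (fun (acc : List Int) (c : Int) =>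
          if used_values.all (fun u => decide (min_sep ≤ |c - u|))
          then acc ++ [(fun x : Int => x) c] else acc) from by
      funext acc c
      rw [pvCond_eq used_values c min_sep]]
    rw [PySem.List.foldl_append_if (fun c => used_values.all (fun u => decide (min_sep ≤ |c - u|)))
        (fun x : Int => x) candidates []]
    simp [List.map_id']
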